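-- pv_equiv track=rewrite | github.com/jaeyoungjang2/coding | 1759_2.py | check
-- ===== SOURCE A (Python) =====
-- def check(res):
--     checkCount = 0
--     checkLst = ["a", "e", "i", "o", "u"]
--     for i in res:
--         if i in checkLst:
--             checkCount += 1
--     if checkCount == 2:
--         return True
--     return False
-- ===== SOURCE B (Python) =====
-- def check(res):
--     total = 0
--     for v in "aeiou":
--         total += res.count(v)
--     return total == 2
-- ===== Notes on version B (the rewrite author's own statement) =====
-- stated objective: faster
-- what changed: Replaces the single Python-level character loop with a per-vowel decomposition: five str.count scans (one per vowel) summed and compared to 2.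
import Mathlib
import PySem

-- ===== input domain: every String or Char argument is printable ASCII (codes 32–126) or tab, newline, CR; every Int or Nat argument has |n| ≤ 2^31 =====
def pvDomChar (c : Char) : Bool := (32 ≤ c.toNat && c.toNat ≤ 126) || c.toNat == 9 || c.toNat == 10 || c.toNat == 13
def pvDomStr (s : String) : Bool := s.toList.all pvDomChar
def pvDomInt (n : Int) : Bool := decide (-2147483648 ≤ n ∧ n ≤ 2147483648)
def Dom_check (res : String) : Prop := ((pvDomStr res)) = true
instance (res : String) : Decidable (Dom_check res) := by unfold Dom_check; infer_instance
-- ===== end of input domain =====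

-- B replaces A's single pass with a vowel counter by five per-vowel str.count scans summed; objective: alternative decomposition.

-- ===== PORT A =====
def check (res : String) : Bool :=
  let checkLst : List Char := ['a', 'e', 'i', 'o', 'u']
  let checkCount : Int :=
    res.toList.foldl (fun acc i => if i ∈ checkLst then acc + 1 else acc) 0
  if checkCount == 2 then true else false

-- ===== PORT B =====
def check_alt (res : String) : Bool :=
  let total : Int :=
    ("aeiou".toList).foldl (fun t v => t + (PySem.Str.count res (String.ofList [v]) : Int)) 0
  total == 2

-- ===== PRECONDITION & SPEC =====
def Spec_check (res : String) (out : Bool) : Prop := out = check_alt res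
instance (res : String) (out : Bool) : Decidable (Spec_check res out) := by unfold Spec_check; infer_instance

-- ===== CLAIM (what is proved, stated in full; the proofs are below) =====
def Claim_equal_check : Prop := ∀ (res : String), Dom_check res → Spec_check res (check res)

-- ===== LEMMAS AND PROOFS =====

-- Chars.count.go with a single-character pattern counts occurrences of that character.
theorem go_single (c : Char) : ∀ (fuel : Nat) (s : List Char) (acc : Nat), s.length ≤ fuel →
    PySem.Chars.count.go [c] fuel s acc = acc + s.count c
  | 0, s, acc, h => by
      have : s = [] := List.eq_nil_of_length_eq_zero (Nat.le_zero.mp h)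
      subst this; simp [PySem.Chars.count.go]
  | fuel+1, [], acc, h => by simp [PySem.Chars.count.go]
  | fuel+1, x :: t, acc, h => by
      rw [PySem.Chars.count.go]
      have ht : t.length ≤ fuel := by simpa using h
      by_cases hx : x = c
      · simp [List.isPrefixOf, hx, go_single c fuel t (acc+1) ht]
        omega
      · have hx' : ¬ c = x := fun h' => hx h'.symm
        simp [List.isPrefixOf, hx, hx', go_single c fuel t acc ht]

theorem chars_count_single (l : List Char) (c : Char) :
    PySem.Chars.count l [c] = l.count c := by
  rw [PySem.Chars.count]
  simp [go_single c l.length l 0 le_rfl]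

theorem str_count_single (s : String) (c : Char) :
    PySem.Str.count s (String.ofList [c]) = s.toList.count c := by
  rw [PySem.Str.count_eq]
  simpa using chars_count_single s.toList c

theorem countP_vowels (l : List Char) :
    l.countP (fun i => decide (i ∈ (['a','e','i','o','u'] : List Char))) =
      l.count 'a' + l.count 'e' + l.count 'i' + l.count 'o' + l.count 'u' := by
  induction l with
  | nil => simp
  | cons x t ih =>
      simp only [List.countP_cons, List.count_cons, ih]
      by_cases h1 : x = 'a' <;> by_cases h2 : x = 'e' <;> by_cases h3 : x = 'i' <;>
        by_cases h4 : x = 'o' <;> by_cases h5 : x = 'u' <;> simp_all <;> omega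

-- ===== VERDICT (by name: the statement is the Claim_ definition above) =====
theorem check_spec : Claim_equal_check := by
  intro res _
  show check res = check_alt res
  unfold check check_alt
  simp only [PySem.List.foldl_ite_add_one, str_count_single]
  have hv : "aeiou".toList = ['a','e','i','o','u'] := rfl
  rw [hv, countP_vowels]
  simp only [List.foldl]
  push_cast
  have e : (0 : Int) + ((res.toList.count 'a' : Int) + (res.toList.count 'e') + (res.toList.count 'i')
      + (res.toList.count 'o') + (res.toList.count 'u')) =
      (0 : Int) + (res.toList.count 'a') + (res.toList.count 'e') + (res.toList.count 'i')
      + (res.toList.count 'o') + (res.toList.count 'u') := by ring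
  rw [e]
  cases hx : ((0 : Int) + (res.toList.count 'a') + (res.toList.count 'e') + (res.toList.count 'i')
      + (res.toList.count 'o') + (res.toList.count 'u') == 2) <;> simp [hx]
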